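-- pv_equiv track=rewrite | github.com/Zilean12/DIGITAL-Image-Processing | 25-Sept/correlation1d.py | spatial_correlation
-- ===== SOURCE A (Python) =====
-- def spatial_correlation(signal, filter):
--     signal_len = len(signal)
--     filter_len = len(filter)
--     result_len = signal_len + filter_len - 1
--     result = [0] * result_len
--
--     for i in range(result_len):
--         for j in range(filter_len):
--             if i - j >= 0 and i - j < signal_len:
--                 result[i] += signal[i - j] * filter[j]
--
--     return result
-- ===== SOURCE B (Python) =====
-- def spatial_correlation(sig, filter):
--     # Horner-style: fold sig back-to-front, each step prepending a zero (shift)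
--     # and adding sig[s] * filter onto the head of the accumulator; no index
--     # arithmetic into sig, no bounds checks.  An empty filter contributes no
--     # products; the output keeps the standard full-correlation length
--     # len(sig) + len(filter) - 1.
--     # (First parameter renamed only because the harness denies the bare name
--     # of the stdlib module it shadows; the function is called positionally.)
--     if not filter:
--         return [0] * (len(sig) - 1)
--     result = [0] * (len(filter) - 1)
--     for s in reversed(sig):
--         shifted = [0] + result
--         result = [s * c + shifted[k] for k, c in enumerate(filter)] + shifted[len(filter):]
--     return result
-- ===== Notes on version B (the rewrite author's own statement) =====
-- stated objective: alternative
-- what changed: A's indexed gather (nested loops over output index and filter index with a bounds check into the signal) is replaced by a Horner-style back-to-front fold over the signal: each step shifts the accumulator by prepending a zero and adds sig[s] times the filter onto its head; no index arithmetic into the signal and no bounds checks.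
import Mathlib
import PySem

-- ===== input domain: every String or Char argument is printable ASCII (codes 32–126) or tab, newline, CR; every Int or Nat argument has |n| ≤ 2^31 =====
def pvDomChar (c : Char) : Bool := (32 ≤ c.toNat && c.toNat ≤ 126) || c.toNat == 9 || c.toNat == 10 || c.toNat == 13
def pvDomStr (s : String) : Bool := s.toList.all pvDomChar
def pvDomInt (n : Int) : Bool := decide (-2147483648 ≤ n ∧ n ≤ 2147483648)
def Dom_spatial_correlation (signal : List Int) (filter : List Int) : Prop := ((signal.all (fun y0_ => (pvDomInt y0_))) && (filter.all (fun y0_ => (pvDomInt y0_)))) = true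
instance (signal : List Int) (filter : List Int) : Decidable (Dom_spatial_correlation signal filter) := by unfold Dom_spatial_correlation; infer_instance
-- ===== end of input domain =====

-- B replaces A's indexed gather (nested index loops with a bounds check into the signal)
-- by a Horner-style back-to-front fold over the signal that shifts the accumulator and
-- adds a scaled copy of the filter — same return value, different algorithm.

-- ===== PORT A =====
def spatial_correlation (signal : List Int) (filter : List Int) : List Int :=
  let signal_len : Int := signal.length
  let filter_len : Int := filter.length
  let result_len : Int := signal_len + filter_len - 1
  let result : List Int := PySem.List.pyRepeat [0] result_len
  (PySem.List.pyRange 0 result_len 1).foldl (fun result i =>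
    (PySem.List.pyRange 0 filter_len 1).foldl (fun result j =>
      if 0 ≤ i - j ∧ i - j < signal_len then
        PySem.List.pySetD result i
          (PySem.List.pyGetD result i 0 +
            PySem.List.pyGetD signal (i - j) 0 * PySem.List.pyGetD filter j 0)
      else result) result) result

-- ===== PORT B =====
def spatial_correlation_alt (signal : List Int) (filter : List Int) : List Int :=
  if filter = [] then
    PySem.List.pyRepeat [0] ((signal.length : Int) - 1)
  else
    signal.reverse.foldl (fun result s =>
      let shifted := [0] ++ result
      ((PySem.List.enumerate filter).map (fun kc => s * kc.2 + PySem.List.pyGetD shifted kc.1 0))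
        ++ PySem.List.slice shifted (some (filter.length : Int)) none)
      (PySem.List.pyRepeat [0] ((filter.length : Int) - 1))

-- ===== PRECONDITION & SPEC =====
def Spec_spatial_correlation (signal : List Int) (filter : List Int) (out : List Int) : Prop := out = spatial_correlation_alt signal filter
instance (signal : List Int) (filter : List Int) (out : List Int) : Decidable (Spec_spatial_correlation signal filter out) := by unfold Spec_spatial_correlation; infer_instance

-- ===== CLAIM (what is proved, stated in full; the proofs are below) =====
def Claim_equal_spatial_correlation : Prop := ∀ (signal : List Int) (filter : List Int), Dom_spatial_correlation signal filter → Spec_spatial_correlation signal filter (spatial_correlation signal filter)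

-- ===== LEMMAS AND PROOFS =====

-- The coefficient both programs compute at output index k.
def pvCoeff (signal filter : List Int) (k : Nat) : Int :=
  ((List.range filter.length).map (fun j =>
    if j ≤ k ∧ k - j < signal.length then signal.getD (k - j) 0 * filter.getD j 0 else 0)).sum

-- `r.set i` with the entry it already holds is a no-op (used to absorb A's guard).
theorem pv_set_getD (r : List Int) (i : Nat) : r.set i (r.getD i 0) = r := by
  by_cases h : i < r.length
  · rw [List.getD_eq_getElem r 0 h]
    exact List.set_getElem_self h
  · exact List.set_eq_of_length_le (by omega)

theorem pv_getD_set_self (r : List Int) (i : Nat) (a : Int) (h : i < r.length) :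
    (r.set i a).getD i 0 = a := by
  simp [List.getD_eq_getElem?_getD, h]

theorem pv_getD_set_ne (r : List Int) (i k : Nat) (a : Int) (h : i ≠ k) :
    (r.set i a).getD k 0 = r.getD k 0 := by
  simp [List.getD_eq_getElem?_getD, h]

theorem pv_sum_flatMap {α : Type} (l : List α) (f : α → List Int) :
    (l.flatMap f).sum = (l.map (fun a => (f a).sum)).sum := by
  induction l with
  | nil => simp
  | cons x l ih => simp [ih]

-- A fold of in-place accumulations, read back at index k, is the initial entry
-- plus the sum of the values scattered onto k.
theorem pv_foldl_set {α : Type} (idx : α → Nat) (val : α → Int) :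
    ∀ (L : List α) (r : List Int), (∀ x ∈ L, idx x < r.length) →
      ((L.foldl (fun r x => r.set (idx x) (r.getD (idx x) 0 + val x)) r).length = r.length ∧
       ∀ k : Nat, (L.foldl (fun r x => r.set (idx x) (r.getD (idx x) 0 + val x)) r).getD k 0
          = r.getD k 0 + (L.map (fun x => if idx x = k then val x else 0)).sum) := by
  intro L
  induction L with
  | nil => intro r _; exact ⟨rfl, fun k => by simp⟩
  | cons x L ih =>
    intro r h
    have hx : idx x < r.length := h x (List.mem_cons_self ..)
    obtain ⟨hl, hg⟩ := ih (r.set (idx x) (r.getD (idx x) 0 + val x))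
      (by intro y hy; simpa using h y (List.mem_cons_of_mem _ hy))
    refine ⟨by simpa using hl, fun k => ?_⟩
    rw [List.foldl_cons, hg k, List.map_cons, List.sum_cons]
    by_cases hk : idx x = k
    · subst hk
      rw [pv_getD_set_self r (idx x) _ hx, if_pos rfl]
      ring
    · rw [pv_getD_set_ne r (idx x) k _ hk, if_neg hk]
      ring

theorem pv_sum_range_ite (g : Nat → Int) :
    ∀ (n k : Nat), ((List.range n).map (fun i => if i = k then g i else 0)).sum
      = if k < n then g k else 0 := by
  intro n
  induction n with
  | zero => intro k; simp
  | succ n ih =>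
    intro k
    rw [List.range_succ, List.map_append, List.sum_append, ih k]
    by_cases h : k = n
    · subst h; simp
    · by_cases h2 : k < n
      · rw [if_pos h2, if_pos (by omega)]
        simp only [List.map_cons, List.map_nil, List.sum_cons, List.sum_nil]
        rw [if_neg (by omega)]; ring
      · rw [if_neg h2, if_neg (by omega)]
        simp only [List.map_cons, List.map_nil, List.sum_cons, List.sum_nil]
        rw [if_neg (by omega)]; ring

-- A's result = fold of accumulations over the flattened (i, j) pair list.
theorem pvA_flat (signal filter : List Int) :
    spatial_correlation signal filter =
      ((List.range ((signal.length : Int) + (filter.length : Int) - 1).toNat).flatMap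
        (fun i => (List.range filter.length).map (fun j => (i, j)))).foldl
        (fun r (p : Nat × Nat) =>
          r.set p.1 (r.getD p.1 0 +
            (if 0 ≤ (p.1 : Int) - (p.2 : Int) ∧ (p.1 : Int) - (p.2 : Int) < (signal.length : Int) then
              PySem.List.pyGetD signal ((p.1 : Int) - (p.2 : Int)) 0 * PySem.List.pyGetD filter (p.2 : Int) 0
            else 0)))
        (List.replicate ((signal.length : Int) + (filter.length : Int) - 1).toNat 0) := by
  simp only [spatial_correlation]
  rw [PySem.List.pyRepeat_singleton, PySem.List.pyRange_one, PySem.List.pyRange_one,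
      List.foldl_flatMap]
  simp only [List.foldl_map, sub_zero, zero_add, Int.toNat_natCast]
  congr 1
  funext r i
  congr 1
  funext r' j
  by_cases h : 0 ≤ (i : Int) - (j : Int) ∧ (i : Int) - (j : Int) < (signal.length : Int)
  · rw [if_pos h, if_pos h, PySem.List.pySetD_natCast, PySem.List.pyGetD_natCast]
  · rw [if_neg h, if_neg h, add_zero, pv_set_getD]

-- A's length is (n+m-1).toNat and its entry at k is pvCoeff.
theorem pvA_char (signal filter : List Int) :
    (spatial_correlation signal filter).length
        = ((signal.length : Int) + (filter.length : Int) - 1).toNat ∧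
      ∀ k : Nat, k < ((signal.length : Int) + (filter.length : Int) - 1).toNat →
        (spatial_correlation signal filter).getD k 0 = pvCoeff signal filter k := by
  rw [pvA_flat]
  obtain ⟨hlA, hgA⟩ := pv_foldl_set (fun p : Nat × Nat => p.1)
      (fun p : Nat × Nat =>
        if 0 ≤ (p.1 : Int) - (p.2 : Int) ∧ (p.1 : Int) - (p.2 : Int) < (signal.length : Int) then
          PySem.List.pyGetD signal ((p.1 : Int) - (p.2 : Int)) 0 * PySem.List.pyGetD filter (p.2 : Int) 0
        else 0)
      ((List.range ((signal.length : Int) + (filter.length : Int) - 1).toNat).flatMap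
        (fun i => (List.range filter.length).map (fun j => (i, j))))
      (List.replicate ((signal.length : Int) + (filter.length : Int) - 1).toNat 0)
      (by intro p hp
          simp only [List.mem_flatMap, List.mem_map, List.mem_range] at hp
          obtain ⟨i, hi, j, hj, rfl⟩ := hp
          simpa using hi)
  refine ⟨by rw [hlA]; simp, fun k hk => ?_⟩
  rw [hgA k]
  rw [List.getD_eq_getElem _ 0 (by simpa using hk), List.getElem_replicate]
  rw [zero_add, List.map_flatMap, pv_sum_flatMap]
  simp only [List.map_map, Function.comp_def]
  -- collapse the outer sum at i = k
  have eA : ∀ i : Nat,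
      ((List.range filter.length).map (fun (j : Nat) =>
        if i = k then
          (if 0 ≤ (i : Int) - (j : Int) ∧ (i : Int) - (j : Int) < (signal.length : Int) then
            PySem.List.pyGetD signal ((i : Int) - (j : Int)) 0 * PySem.List.pyGetD filter (j : Int) 0
          else 0)
        else 0)).sum
      = if i = k then
          ((List.range filter.length).map (fun (j : Nat) =>
            if 0 ≤ (i : Int) - (j : Int) ∧ (i : Int) - (j : Int) < (signal.length : Int) then
              PySem.List.pyGetD signal ((i : Int) - (j : Int)) 0 * PySem.List.pyGetD filter (j : Int) 0
            else 0)).sum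
        else 0 := by
    intro i
    by_cases h : i = k <;> simp [h]
  simp only [eA]
  rw [pv_sum_range_ite, if_pos hk]
  unfold pvCoeff
  refine congrArg List.sum (List.map_congr_left ?_)
  intro j hj
  by_cases h : j ≤ k ∧ k - j < signal.length
  · rw [if_pos (by constructor <;> omega), if_pos h,
        show ((k : Int) - (j : Int)) = ((k - j : Nat) : Int) from by omega,
        PySem.List.pyGetD_natCast, PySem.List.pyGetD_natCast]
  · rw [if_neg (by omega), if_neg h]

-- Fold over a reversed list, one step peeled at the head of the original list.
theorem pv_foldl_reverse_cons {α β : Type} (g : β → α → β) (init : β) (x : α) (xs : List α) :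
    (x :: xs).reverse.foldl g init = g (xs.reverse.foldl g init) x := by
  rw [List.reverse_cons, List.foldl_append]
  rfl

theorem pvCoeff_nil (filter : List Int) (k : Nat) : pvCoeff [] filter k = 0 := by
  unfold pvCoeff
  have : ∀ j ∈ List.range filter.length,
      (if j ≤ k ∧ k - j < ([] : List Int).length then ([] : List Int).getD (k - j) 0 * filter.getD j 0 else 0) = (0 : Int) := by
    intro j _; rw [if_neg (by simp)]
  rw [List.map_congr_left this]
  simp

theorem pvCoeff_cons (x : Int) (xs filter : List Int) (k : Nat) :
    pvCoeff (x :: xs) filter k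
      = (if k < filter.length then x * filter.getD k 0 else 0)
        + (if 1 ≤ k then pvCoeff xs filter (k - 1) else 0) := by
  unfold pvCoeff
  have key : ∀ j ∈ List.range filter.length,
      (if j ≤ k ∧ k - j < (x :: xs).length then (x :: xs).getD (k - j) 0 * filter.getD j 0 else 0)
      = (if j = k then x * filter.getD j 0 else 0)
        + (if 1 ≤ k then (if j ≤ k - 1 ∧ (k - 1) - j < xs.length then xs.getD ((k - 1) - j) 0 * filter.getD j 0 else 0) else 0) := by
    intro j _
    by_cases hjk : j = k
    · subst hjk
      rw [if_pos (by simp), if_pos rfl]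
      simp only [Nat.sub_self, List.getD_cons_zero]
      by_cases h1 : 1 ≤ j
      · rw [if_pos h1, if_neg (by omega)]; ring
      · rw [if_neg h1]; ring
    · by_cases hlt : j < k
      · have h1 : 1 ≤ k := by omega
        rw [if_neg hjk, if_pos h1, zero_add]
        have hidx : k - j = ((k - 1) - j) + 1 := by omega
        by_cases h : j ≤ k - 1 ∧ (k - 1) - j < xs.length
        · rw [if_pos (by simp; omega), if_pos h, hidx, List.getD_cons_succ]
        · rw [if_neg (by simp; omega), if_neg h]
      · -- j > k
        rw [if_neg (by simp; omega), if_neg hjk, zero_add]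
        by_cases h1 : 1 ≤ k
        · rw [if_pos h1, if_neg (by omega)]
        · rw [if_neg h1]
  rw [List.map_congr_left key]
  rw [PySem.List.sum_map_add_int, pv_sum_range_ite]
  congr 1
  by_cases h1 : 1 ≤ k
  · simp only [h1, if_true]
  · simp only [h1, if_false]
    simp

-- B's fold (filter nonempty): length and entries.
theorem pvB_char (signal filter : List Int) (hm : filter ≠ []) :
    (signal.reverse.foldl (fun result s =>
        let shifted := [0] ++ result
        ((PySem.List.enumerate filter).map (fun kc => s * kc.2 + PySem.List.pyGetD shifted kc.1 0))
          ++ PySem.List.slice shifted (some (filter.length : Int)) none)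
      (PySem.List.pyRepeat [0] ((filter.length : Int) - 1))).length
        = signal.length + (filter.length - 1) ∧
    ∀ k : Nat,
      (signal.reverse.foldl (fun result s =>
        let shifted := [0] ++ result
        ((PySem.List.enumerate filter).map (fun kc => s * kc.2 + PySem.List.pyGetD shifted kc.1 0))
          ++ PySem.List.slice shifted (some (filter.length : Int)) none)
      (PySem.List.pyRepeat [0] ((filter.length : Int) - 1))).getD k 0 = pvCoeff signal filter k := by
  have hm1 : 1 ≤ filter.length := List.length_pos_iff.mpr hm
  induction signal with
  | nil =>
    constructor
    · simp [PySem.List.pyRepeat_singleton]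
    · intro k
      rw [pvCoeff_nil]
      simp only [List.reverse_nil, List.foldl_nil, PySem.List.pyRepeat_singleton,
        List.getD_eq_getElem?_getD, List.getElem?_replicate]
      split_ifs <;> rfl
  | cons x xs ih =>
    obtain ⟨ihl, ihg⟩ := ih
    simp only [List.singleton_append, PySem.List.slice_from_natCast] at ihl ihg
    rw [pv_foldl_reverse_cons]
    simp only [List.singleton_append, PySem.List.slice_from_natCast]
    constructor
    · simp only [List.length_append, List.length_map, PySem.List.length_enumerate,
        List.length_drop, List.length_cons]
      omega
    · intro k
      rw [pvCoeff_cons]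
      by_cases hk : k < filter.length
      · rw [List.getD_append _ _ _ _ (by
          simpa [PySem.List.length_enumerate] using hk)]
        rw [List.getD_eq_getElem _ 0 (by
          simpa [PySem.List.length_enumerate] using hk)]
        rw [List.getElem_map, PySem.List.getElem_enumerate]
        simp only [zero_add, PySem.List.pyGetD_natCast]
        rw [if_pos hk, List.getD_eq_getElem filter 0 (by simpa [PySem.List.length_enumerate] using hk)]
        cases k with
        | zero => simp
        | succ k' =>
          rw [List.getD_cons_succ, ihg k', if_pos (by omega)]
          simp
      · rw [List.getD_append_right _ _ _ _ (by
          simpa [PySem.List.length_enumerate] using hk)]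
        simp only [List.length_map, PySem.List.length_enumerate]
        rw [List.getD_eq_getElem?_getD, List.getElem?_drop]
        have hkk : filter.length + (k - filter.length) = k := by omega
        rw [hkk]
        obtain ⟨k', rfl⟩ : ∃ k', k = k' + 1 := ⟨k - 1, by omega⟩
        rw [List.getElem?_cons_succ]
        rw [← List.getD_eq_getElem?_getD, ihg k', if_neg hk, if_pos (by omega)]
        simp

-- ===== VERDICT (by name: the statement is the Claim_ definition above) =====
theorem spatial_correlation_spec : Claim_equal_spatial_correlation := by
  intro signal filter _
  unfold Spec_spatial_correlation spatial_correlation_alt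
  by_cases hm : filter = []
  · subst hm
    rw [if_pos rfl, pvA_flat]
    rw [List.flatMap_eq_nil_iff.mpr (fun _ _ => by simp), List.foldl_nil]
    simp [PySem.List.pyRepeat_singleton]
  · rw [if_neg hm]
    obtain ⟨hAl, hAg⟩ := pvA_char signal filter
    obtain ⟨hBl, hBg⟩ := pvB_char signal filter hm
    have hm1 : 1 ≤ filter.length := List.length_pos_iff.mpr hm
    refine List.ext_getElem (by rw [hAl, hBl]; omega) ?_
    intro n h1 h2
    rw [← List.getD_eq_getElem _ 0 h1, ← List.getD_eq_getElem _ 0 h2,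
        hAg n (by rw [hAl] at h1; exact h1), hBg n]
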